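-- pv_equiv track=rewrite | github.com/MatthijsvanderPlas/Python-Winc | for/main.py | alphabet_set
-- ===== SOURCE A (Python) =====
-- import string
--
-- def count_letter_of_alphabet(input_string, alphabet):
--     count = 0
--     for c in input_string:
--         if c in alphabet:
--             count += 1
--     return count
--
-- def alphabet_set(list_of_countries):
--     alphabet = list(string.ascii_lowercase)
--     result = []
--     all_countries = list_of_countries
--     for i in range(len(list_of_countries)):
--         sorted_list = sorted(all_countries, key=lambda x: count_letter_of_alphabet(x, alphabet), reverse=True)
--         for character in sorted_list[0].lower():
--             if character in alphabet:
--                 alphabet.pop(alphabet.index(character))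
--         result.append(sorted_list[0])
--         all_countries.pop(all_countries.index(sorted_list[0]))
--         if len(alphabet) == 0:
--             break
--     return result
-- ===== SOURCE B (Python) =====
-- import string
--
--
-- def letter_counts(country):
--     d = {}
--     for ch in country:
--         if ch in string.ascii_lowercase:
--             d[ch] = d.get(ch, 0) + 1
--     return d
--
--
-- def alphabet_set(list_of_countries):
--     remaining = list(list_of_countries)
--     counts = [letter_counts(c) for c in remaining]
--     scores = [sum(d.values()) for d in counts]
--     alphabet = set(string.ascii_lowercase)
--     result = []
--     while remaining:
--         best = scores.index(max(scores))
--         pick = remaining.pop(best)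
--         counts.pop(best)
--         scores.pop(best)
--         result.append(pick)
--         removed = alphabet & set(pick.lower())
--         if removed:
--             alphabet -= removed
--             scores = [s - sum(d.get(l, 0) for l in removed) for s, d in zip(scores, counts)]
--         if not alphabet:
--             break
--     return result
-- ===== Notes on version B (the rewrite author's own statement) =====
-- stated objective: faster
-- what changed: B builds one letter-count dict per country once, keeps the alphabet as a set and a per-country score list that it updates only when letters actually leave the alphabet (at most 26 times in total), and picks each round's country with a single max/index/pop instead of A's per-round stable sort that recounts every character of every remaining country against the alphabet list; B also does not mutate the caller's list.
import Mathlib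
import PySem

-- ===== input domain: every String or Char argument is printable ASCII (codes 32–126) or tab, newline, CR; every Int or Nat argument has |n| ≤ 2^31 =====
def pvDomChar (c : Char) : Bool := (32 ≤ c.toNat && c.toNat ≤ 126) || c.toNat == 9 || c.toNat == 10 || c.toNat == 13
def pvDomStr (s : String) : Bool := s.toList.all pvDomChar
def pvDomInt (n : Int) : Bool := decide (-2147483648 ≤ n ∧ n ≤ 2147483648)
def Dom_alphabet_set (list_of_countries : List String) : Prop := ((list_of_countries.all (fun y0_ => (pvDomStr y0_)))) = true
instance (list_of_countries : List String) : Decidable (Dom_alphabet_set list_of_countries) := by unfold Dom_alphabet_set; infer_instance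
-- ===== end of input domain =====

-- B replaces A's per-round stable sort and per-character rescans by letter-count dicts built
-- once, a score list updated only when letters leave the alphabet (a set), and one max/index/pop
-- per round; equivalence is about the RETURN value only (Python A pops the picked countries out
-- of the caller's list in place, B does not mutate it).

-- ===== PORT A =====
def count_letter_of_alphabet (input_string : String) (alphabet : List Char) : Int :=
  input_string.toList.foldl (fun count c => if alphabet.contains c then count + 1 else count) 0

def alphabetSetLoopA : Nat → List Char → List String → List String → List String
  | 0, _, result, _ => result
  | fuel + 1, alphabet, result, all_countries =>
    match PySem.List.sorted all_countries (fun x => count_letter_of_alphabet x alphabet) true with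
    | [] => result  -- totality guard for sorted_list[0]: unreachable, all_countries is nonempty whenever the body runs
    | pick :: _ =>
      -- for character in sorted_list[0].lower(): if character in alphabet: alphabet.pop(alphabet.index(character))
      let alphabet' := (PySem.Str.lower pick).toList.foldl
        (fun al character => if al.contains character then al.erase character else al) alphabet
      let result' := result ++ [pick]
      -- all_countries.pop(all_countries.index(sorted_list[0])) = erase the first occurrence
      let all' := all_countries.erase pick
      if alphabet'.length = 0 then result' else alphabetSetLoopA fuel alphabet' result' all'

def alphabet_set (list_of_countries : List String) : List String :=
  alphabetSetLoopA list_of_countries.length "abcdefghijklmnopqrstuvwxyz".toList [] list_of_countries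

-- ===== PORT B =====
def letter_counts (country : String) : PySem.Dict Char Int :=
  country.toList.foldl
    (fun d ch => if ("abcdefghijklmnopqrstuvwxyz".toList).contains ch
                 then d.insert ch (d.getD ch 0 + 1) else d)
    PySem.Dict.empty

def alphabetSetLoopB :
    Nat → PySem.Set Char → List String → List String → List (PySem.Dict Char Int) → List Int → List String
  | 0, _, result, _, _, _ => result
  | fuel + 1, alphabet, result, remaining, counts, scores =>
    match PySem.List.max? scores (fun y => y) with
    | none => result  -- scores is empty exactly when remaining is: the while condition fails
    | some m =>
      match PySem.List.index? scores m with
      | none => result  -- totality guard for scores.index(m): unreachable, the max is in scores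
      | some best =>
        match PySem.List.pop? remaining (best : Int), PySem.List.pop? counts (best : Int),
              PySem.List.pop? scores (best : Int) with
        | some (pick, remaining'), some (_, counts'), some (_, scores') =>
          let result' := result ++ [pick]
          let removed := PySem.Set.inter alphabet (PySem.Set.ofList (PySem.Str.lower pick).toList)
          -- if removed: alphabet -= removed; scores = [s - sum(...) for s, d in zip(scores, counts)]
          let st := if removed ≠ [] then
              (PySem.Set.diff alphabet removed,
               (scores'.zip counts').map
                 (fun sd => sd.1 - (removed.map (fun l => sd.2.getD l 0)).sum))
            else (alphabet, scores')
          if st.1 = [] then result' else alphabetSetLoopB fuel st.1 result' remaining' counts' st.2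
        | _, _, _ => result  -- totality guards for the three pops: unreachable, best indexes all three lists

def alphabet_set_alt (list_of_countries : List String) : List String :=
  let remaining := list_of_countries
  let counts := remaining.map (fun c => letter_counts c)
  let scores := counts.map (fun d => d.values.sum)
  alphabetSetLoopB list_of_countries.length
    (PySem.Set.ofList "abcdefghijklmnopqrstuvwxyz".toList) [] remaining counts scores

-- ===== PRECONDITION & SPEC =====
def Spec_alphabet_set (list_of_countries : List String) (out : List String) : Prop := out = alphabet_set_alt list_of_countries
instance (list_of_countries : List String) (out : List String) : Decidable (Spec_alphabet_set list_of_countries out) := by unfold Spec_alphabet_set; infer_instance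

-- ===== CLAIM (what is proved, stated in full; the proofs are below) =====
def Claim_equal_alphabet_set : Prop := ∀ (list_of_countries : List String), Dom_alphabet_set list_of_countries → Spec_alphabet_set list_of_countries (alphabet_set list_of_countries)

-- ===== LEMMAS AND PROOFS =====

-- a foldl whose body is guarded by `if p x` is the foldl over the filtered list
theorem foldl_if_guard {α β : Type} (p : α → Bool) (f : β → α → β) :
    ∀ (l : List α) (d : β),
      l.foldl (fun d x => if p x then f d x else d) d = (l.filter p).foldl f d := by
  intro l
  induction l with
  | nil => intro d; rfl
  | cons x xs ih =>
    intro d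
    rw [List.foldl_cons, List.filter_cons]
    by_cases h : p x = true
    · simp only [h, if_pos, List.foldl_cons]
      exact ih (f d x)
    · simp only [h]
      simpa using ih d

-- the per-letter dict of B holds exactly the raw-character counts of the lowercase letters
theorem letter_counts_getD (s : String) (l : Char) :
    (letter_counts s).getD l 0
      = ((s.toList.filter (fun ch => ("abcdefghijklmnopqrstuvwxyz".toList).contains ch)).count l : Int) := by
  unfold letter_counts
  rw [foldl_if_guard, PySem.Dict.getD_foldl_insert_add_one]
  have h0 : (PySem.Dict.empty : PySem.Dict Char Int).getD l 0 = 0 := rfl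
  rw [h0, zero_add]

-- summing l = x indicators over a duplicate-free list is one membership test
theorem sum_indicator_nodup (al : List Char) (h : al.Nodup) (x : Char) :
    (al.map (fun l => if l = x then (1:Int) else 0)).sum = if x ∈ al then 1 else 0 := by
  induction al with
  | nil => simp
  | cons a al ih =>
    have ha : a ∉ al := (List.nodup_cons.mp h).1
    have hal : al.Nodup := (List.nodup_cons.mp h).2
    rw [List.map_cons, List.sum_cons, ih hal]
    by_cases hx : a = x
    · subst hx
      simp [ha]
    · have hxa : ¬ x = a := fun hh => hx hh.symm
      simp [List.mem_cons, hx, hxa]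

-- summing per-letter counts over a duplicate-free letter list is counting membership
theorem sum_count_eq_countP (al : List Char) (h : al.Nodup) (xs : List Char) :
    (al.map (fun l => (xs.count l : Int))).sum = ((xs.countP (fun c => al.contains c) : Nat) : Int) := by
  induction xs with
  | nil => simp
  | cons x xs ih =>
    have pointwise : ∀ l ∈ al, (((x :: xs).count l : Nat) : Int)
        = ((xs.count l : Nat) : Int) + (if l = x then (1:Int) else 0) := by
      intro l _
      rw [List.count_cons]
      by_cases hlx : l = x
      · subst hlx
        simp
      · have hxl : ¬ x = l := fun hh => hlx hh.symm
        simp [hlx, hxl]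
    have hsplit : (al.map (fun l => (((x :: xs).count l : Nat) : Int))).sum
        = (al.map (fun l => ((xs.count l : Nat) : Int))).sum
          + (al.map (fun l => if l = x then (1:Int) else 0)).sum := by
      rw [← PySem.List.sum_map_add_int]
      exact congrArg List.sum (List.map_congr_left pointwise)
    rw [hsplit, ih, sum_indicator_nodup al h x, List.countP_cons]
    by_cases hx : x ∈ al
    · simp [hx]
    · simp [hx]

-- A's counting loop is countP
theorem count_letter_eq_countP (s : String) (al : List Char) :
    count_letter_of_alphabet s al = ((s.toList.countP (fun c => al.contains c) : Nat) : Int) := by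
  unfold count_letter_of_alphabet
  rw [PySem.List.foldl_count_if, zero_add]

-- B's score of one country over the current alphabet equals A's sort key
theorem score_eq_key (al : List Char) (hnd : al.Nodup)
    (hsub : ∀ x ∈ al, x ∈ "abcdefghijklmnopqrstuvwxyz".toList) (s : String) :
    (al.map (fun l => (letter_counts s).getD l 0)).sum = count_letter_of_alphabet s al := by
  rw [count_letter_eq_countP]
  have h1 : ∀ l ∈ al, (letter_counts s).getD l 0 = (s.toList.count l : Int) := by
    intro l hl
    rw [letter_counts_getD]
    have hp : (("abcdefghijklmnopqrstuvwxyz".toList).contains l) = true := by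
      simpa using hsub l hl
    rw [List.count_filter hp]
  rw [List.map_congr_left h1, sum_count_eq_countP al hnd]

-- B's initial score of a country is its score against the full alphabet
theorem values_sum_letter_counts (s : String) :
    (letter_counts s).values.sum
      = count_letter_of_alphabet s ("abcdefghijklmnopqrstuvwxyz".toList) := by
  unfold letter_counts
  rw [foldl_if_guard, PySem.Dict.foldl_insert_getD_add_one_eq_counter, count_letter_eq_countP]
  have hv : (PySem.Dict.counter
        (s.toList.filter (fun ch => ("abcdefghijklmnopqrstuvwxyz".toList).contains ch))).values
      = (PySem.Set.ofList
          (s.toList.filter (fun ch => ("abcdefghijklmnopqrstuvwxyz".toList).contains ch))).map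
          (fun k => ((s.toList.filter
              (fun ch => ("abcdefghijklmnopqrstuvwxyz".toList).contains ch)).count k : Int)) := by
    simp only [PySem.Dict.values, PySem.Dict.items_counter, List.map_map]
    rfl
  rw [hv, sum_count_eq_countP _ (PySem.Set.nodup_ofList _)]
  congr 1
  have h1 : ∀ a ∈ s.toList.filter (fun ch => ("abcdefghijklmnopqrstuvwxyz".toList).contains ch),
      List.contains (PySem.Set.ofList
        (s.toList.filter (fun ch => ("abcdefghijklmnopqrstuvwxyz".toList).contains ch))) a = true := by
    intro a ha
    simpa using (PySem.Set.mem_ofList _ a).mpr ha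
  rw [List.countP_eq_length.mpr h1]
  exact List.countP_eq_length_filter.symm

-- head of an insertBy step = running first-max step
theorem insertBy_rev_head {α κ : Type} [LinearOrder κ] (key : α → κ) (x : α) (acc : List α) :
    (PySem.List.insertBy (fun a b => decide (key b < key a)) x acc).head?
      = some (match acc.head? with
              | none => x
              | some m => if key m < key x then x else m) := by
  cases acc with
  | nil => rfl
  | cons m t =>
    simp only [PySem.List.insertBy]
    by_cases h : key m < key x
    · simp [h]
    · simp [h]

theorem foldl_insertBy_head {α κ : Type} [LinearOrder κ] (key : α → κ) :
    ∀ (xs acc : List α),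
      (xs.foldl (fun acc x => PySem.List.insertBy (fun a b => decide (key b < key a)) x acc) acc).head?
        = xs.foldl (fun o x => match o with
            | none => some x
            | some m => if key m < key x then some x else some m) acc.head? := by
  intro xs
  induction xs with
  | nil => intro acc; rfl
  | cons x xs ih =>
    intro acc
    rw [List.foldl_cons, List.foldl_cons, ih, insertBy_rev_head]
    congr 1
    cases acc with
    | nil => rfl
    | cons m t =>
      by_cases h : key m < key x
      · simp [h]
      · simp [h]

-- the head of Python's stable reverse sort is Python's max (first maximal element)
theorem sorted_rev_head_eq_max? {α κ : Type} [LinearOrder κ] (xs : List α) (key : α → κ) :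
    (PySem.List.sorted xs key true).head? = PySem.List.max? xs key := by
  rw [PySem.List.sorted_rev_eq_foldl_insertBy, foldl_insertBy_head]
  rfl

-- the running-max fold keeps the FIRST maximal element: a decomposition of the list
theorem foldl_max_first {α κ : Type} [LinearOrder κ] (key : α → κ) :
    ∀ (xs : List α) (m p : α),
      xs.foldl (fun acc x => match acc with
          | none => some x
          | some m => if key m < key x then some x else some m) (some m) = some p →
      (p = m ∧ ∀ y ∈ xs, key y ≤ key m) ∨
      (∃ l₁ l₂, xs = l₁ ++ p :: l₂ ∧ key m < key p ∧ (∀ y ∈ l₁, key y < key p)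
        ∧ (∀ y ∈ l₂, key y ≤ key p)) := by
  intro xs
  induction xs with
  | nil =>
    intro m p h
    left
    have h2 : some m = some p := h
    injection h2 with h3
    exact ⟨h3.symm, by simp⟩
  | cons x xs ih =>
    intro m p h
    rw [List.foldl_cons] at h
    have h' : xs.foldl (fun acc x => match acc with
        | none => some x
        | some m => if key m < key x then some x else some m)
        (if key m < key x then some x else some m) = some p := h
    by_cases hlt : key m < key x
    · rw [if_pos hlt] at h'
      rcases ih x p h' with ⟨hpx, hall⟩ | ⟨l₁, l₂, hxs, hmp, hl₁, hl₂⟩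
      · subst hpx
        exact Or.inr ⟨[], xs, by simp, hlt, by simp, hall⟩
      · refine Or.inr ⟨x :: l₁, l₂, by simp [hxs], lt_trans hlt hmp, ?_, hl₂⟩
        intro y hy
        rcases List.mem_cons.mp hy with rfl | hy'
        · exact hmp
        · exact hl₁ y hy'
    · rw [if_neg hlt] at h'
      rcases ih m p h' with ⟨hpm, hall⟩ | ⟨l₁, l₂, hxs, hmp, hl₁, hl₂⟩
      · refine Or.inl ⟨hpm, ?_⟩
        intro y hy
        rcases List.mem_cons.mp hy with rfl | hy'
        · exact le_of_not_gt hlt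
        · exact hall y hy'
      · refine Or.inr ⟨x :: l₁, l₂, by simp [hxs], hmp, ?_, hl₂⟩
        intro y hy
        rcases List.mem_cons.mp hy with rfl | hy'
        · exact lt_of_le_of_lt (le_of_not_gt hlt) hmp
        · exact hl₁ y hy'

-- Python's max keyed pick: the list splits at the first maximal element
theorem max?_first {α κ : Type} [LinearOrder κ] (xs : List α) (key : α → κ) (p : α)
    (h : PySem.List.max? xs key = some p) :
    ∃ l₁ l₂, xs = l₁ ++ p :: l₂ ∧ ∀ y ∈ l₁, key y < key p := by
  cases xs with
  | nil => cases h
  | cons x xs =>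
    have h' : xs.foldl (fun acc x => match acc with
        | none => some x
        | some m => if key m < key x then some x else some m) (some x) = some p := h
    rcases foldl_max_first key xs x p h' with ⟨hp, _⟩ | ⟨l₁, l₂, hxs, hmp, hl₁, _⟩
    · exact ⟨[], xs, by simp [hp], by simp⟩
    · refine ⟨x :: l₁, l₂, by simp [hxs], ?_⟩
      intro y hy
      rcases List.mem_cons.mp hy with rfl | hy'
      · exact hmp
      · exact hl₁ y hy'

-- the two running-max step functions, named so the folds can be rewritten to them
def maxStepInt (acc : Option Int) (x : Int) : Option Int :=
  match acc with
  | none => some x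
  | some m => if m < x then some x else some m

def maxStepKey (f : String → Int) (acc : Option String) (x : String) : Option String :=
  match acc with
  | none => some x
  | some m => if f m < f x then some x else some m

-- two foldl step functions that agree pointwise give the same fold
theorem foldl_fun_ext {α β : Type} (f g : β → α → β) (h : ∀ b a, f b a = g b a) :
    ∀ (l : List α) (i : β), l.foldl f i = l.foldl g i := by
  intro l
  induction l with
  | nil => intro i; rfl
  | cons x xs ih =>
    intro i
    rw [List.foldl_cons, List.foldl_cons, h]
    exact ih _

-- the running max over mapped values mirrors the keyed running max
theorem foldl_max_map (f : String → Int) :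
    ∀ (xs : List String) (acc : Option String) (accI : Option Int), accI = acc.map f →
      (xs.map f).foldl maxStepInt accI = (xs.foldl (maxStepKey f) acc).map f := by
  intro xs
  induction xs with
  | nil => intro acc accI h; rw [h]; rfl
  | cons x xs ih =>
    intro acc accI h
    rw [List.map_cons, List.foldl_cons, List.foldl_cons]
    apply ih
    subst h
    cases acc with
    | none => rfl
    | some m =>
      show (if f m < f x then some (f x) else some (f m))
          = (if f m < f x then some x else some m).map f
      by_cases hlt : f m < f x
      · rw [if_pos hlt, if_pos hlt]; rfl
      · rw [if_neg hlt, if_neg hlt]; rfl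

-- max(scores) where scores = [key(c) for c in xs] is key of max(xs, key)
theorem max?_map (xs : List String) (f : String → Int) :
    PySem.List.max? (xs.map f) (fun y => y) = (PySem.List.max? xs f).map f := by
  have e2 : PySem.List.max? (xs.map f) (fun y => y) = (xs.map f).foldl maxStepInt none := by
    simp only [PySem.List.max?]
    exact foldl_fun_ext _ _ (by intro b a; cases b <;> rfl) (xs.map f) none
  have e3 : PySem.List.max? xs f = xs.foldl (maxStepKey f) none := by
    simp only [PySem.List.max?]
    exact foldl_fun_ext _ _ (by intro b a; cases b <;> rfl) xs none
  rw [e2, e3]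
  exact foldl_max_map f xs none none rfl

-- scores.index(m) finds the first position of m
theorem idxOf?_append_self {α : Type} [BEq α] [LawfulBEq α] (v : α) :
    ∀ (l₁ l₂ : List α), v ∉ l₁ → List.idxOf? v (l₁ ++ v :: l₂) = some l₁.length := by
  intro l₁
  induction l₁ with
  | nil =>
    intro l₂ _
    simp [List.idxOf?, List.findIdx?_cons]
  | cons x l₁ ih =>
    intro l₂ h
    have hvx : (x == v) = false := by
      simp only [beq_eq_false_iff_ne, ne_eq]
      intro he
      exact h (by rw [he]; exact List.mem_cons_self ..)
    have htail := ih l₂ (fun hm => h (List.mem_cons_of_mem _ hm))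
    simp only [List.idxOf?] at htail ⊢
    rw [List.cons_append, List.findIdx?_cons, hvx]
    simp [htail]

theorem eraseIdx_append_self {α : Type} :
    ∀ (l₁ : List α) (x : α) (l₂ : List α), (l₁ ++ x :: l₂).eraseIdx l₁.length = l₁ ++ l₂ := by
  intro l₁
  induction l₁ with
  | nil => intro x l₂; rfl
  | cons y l₁ ih =>
    intro x l₂
    simp [List.eraseIdx_cons_succ, ih]

-- list.pop(i) at the split position
theorem pop?_append_self {α : Type} (l₁ : List α) (x : α) (l₂ : List α) :
    PySem.List.pop? (l₁ ++ x :: l₂) (l₁.length : Int) = some (x, l₁ ++ l₂) := by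
  have hidx : PySem.List.pyIdx? (l₁ ++ x :: l₂).length (l₁.length : Int) = some l₁.length := by
    unfold PySem.List.pyIdx?
    rw [if_pos (Int.natCast_nonneg _), if_pos (by
      rw [List.length_append, List.length_cons]
      push_cast
      omega)]
    simp
  unfold PySem.List.pop?
  rw [hidx]
  simp [eraseIdx_append_self]

-- A's erase-each-character loop on a duplicate-free alphabet is one filter
theorem erase_fold_eq_filter :
    ∀ (cs : List Char) (al : List Char), al.Nodup →
      cs.foldl (fun al character => if al.contains character then al.erase character else al) al
        = al.filter (fun x => !cs.contains x) := by
  intro cs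
  induction cs with
  | nil => intro al _; simp
  | cons c cs ih =>
    intro al h
    rw [List.foldl_cons]
    have hstep : (if al.contains c then al.erase c else al) = al.erase c := by
      by_cases hc : al.contains c = true
      · rw [if_pos hc]
      · rw [if_neg hc, List.erase_of_not_mem]
        simpa using hc
    rw [hstep, ih (al.erase c) (h.erase c), List.Nodup.erase_eq_filter h c, List.filter_filter]
    apply List.filter_congr
    intro x _
    cases h1 : (x == c) <;> cases h2 : cs.contains x <;>
      simp [h1, bne]
    · exact ⟨by simpa using h1, by simpa using h2⟩
    · exact fun _ => by simpa using h2
    · exact fun hn => absurd (by simpa using h1) hn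
    · exact fun hn => absurd (by simpa using h1) hn

-- a Set built from a list contains exactly the list's elements
theorem contains_ofList {α : Type} [BEq α] [LawfulBEq α] (cs : List α) (x : α) :
    (PySem.Set.ofList cs).contains x = cs.contains x := by
  have h := PySem.Set.mem_ofList cs x
  by_cases hx : x ∈ cs
  · have h1 : x ∈ PySem.Set.ofList cs := h.mpr hx
    simp [PySem.Set.contains, hx, h1]
  · have h1 : x ∉ PySem.Set.ofList cs := fun hh => hx (h.mp hh)
    simp [PySem.Set.contains, hx, h1]

-- a mapped sum splits along a filter partition
theorem sum_map_filter_partition {α : Type} (p : α → Bool) (v : α → Int) :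
    ∀ (l : List α),
      ((l.filter p).map v).sum + ((l.filter (fun x => !p x)).map v).sum = (l.map v).sum := by
  intro l
  induction l with
  | nil => simp
  | cons x l ih =>
    by_cases h : p x = true
    · simp only [List.filter_cons, h, Bool.not_true, List.map_cons, List.sum_cons, List.map,
        if_pos, if_neg, Bool.false_eq_true, not_false_iff]
      omega
    · have h' : p x = false := by simpa using h
      simp only [List.filter_cons, h', Bool.not_false, List.map_cons, List.sum_cons,
        if_pos, Bool.false_eq_true, if_neg, not_false_iff]
      omega

-- the main loop invariant: with a duplicate-free alphabet of lowercase letters, counts and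
-- scores aligned with the remaining countries, the two loops agree
theorem loop_eq :
    ∀ (fuel : Nat) (al : List Char) (res : List String) (rem : List String),
      al.Nodup → (∀ x ∈ al, x ∈ "abcdefghijklmnopqrstuvwxyz".toList) →
      alphabetSetLoopA fuel al res rem
        = alphabetSetLoopB fuel al res rem (rem.map (fun c => letter_counts c))
            (rem.map (fun c => count_letter_of_alphabet c al)) := by
  intro fuel
  induction fuel with
  | zero => intro al res rem _ _; rfl
  | succ fuel ih =>
    intro al res rem hnd hsub
    simp only [alphabetSetLoopA, alphabetSetLoopB]
    cases hs : PySem.List.sorted rem (fun x => count_letter_of_alphabet x al) true with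
    | nil =>
      have hrem0 : rem = [] := (PySem.List.sorted_eq_nil_iff rem _ true).mp hs
      subst hrem0
      rfl
    | cons pick t =>
      have hp : PySem.List.max? rem (fun x => count_letter_of_alphabet x al) = some pick := by
        rw [← sorted_rev_head_eq_max?, hs]
        rfl
      obtain ⟨l₁, l₂, hrem, hpre⟩ :=
        max?_first rem (fun x => count_letter_of_alphabet x al) pick hp
      subst hrem
      have hm : PySem.List.max?
            ((l₁ ++ pick :: l₂).map (fun c => count_letter_of_alphabet c al)) (fun y => y)
          = some (count_letter_of_alphabet pick al) := by
        rw [max?_map, hp]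
        rfl
      have hidx : PySem.List.index?
            ((l₁ ++ pick :: l₂).map (fun c => count_letter_of_alphabet c al))
            (count_letter_of_alphabet pick al) = some l₁.length := by
        have hne : count_letter_of_alphabet pick al
            ∉ l₁.map (fun c => count_letter_of_alphabet c al) := by
          intro hz
          rcases List.mem_map.mp hz with ⟨y, hy, he⟩
          exact absurd he (ne_of_lt (hpre y hy))
        have h := idxOf?_append_self (count_letter_of_alphabet pick al)
          (l₁.map (fun c => count_letter_of_alphabet c al))
          (l₂.map (fun c => count_letter_of_alphabet c al)) hne
        simp only [PySem.List.index?, List.map_append, List.map_cons]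
        simpa [List.length_map] using h
      have hpop1 : PySem.List.pop? (l₁ ++ pick :: l₂) (l₁.length : Int)
          = some (pick, l₁ ++ l₂) := pop?_append_self l₁ pick l₂
      have hpop2 : PySem.List.pop? ((l₁ ++ pick :: l₂).map (fun c => letter_counts c))
            (l₁.length : Int)
          = some (letter_counts pick, (l₁ ++ l₂).map (fun c => letter_counts c)) := by
        have h := pop?_append_self (l₁.map (fun c => letter_counts c)) (letter_counts pick)
          (l₂.map (fun c => letter_counts c))
        rw [List.length_map] at h
        simpa [List.map_append] using h
      have hpop3 : PySem.List.pop?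
            ((l₁ ++ pick :: l₂).map (fun c => count_letter_of_alphabet c al)) (l₁.length : Int)
          = some (count_letter_of_alphabet pick al,
              (l₁ ++ l₂).map (fun c => count_letter_of_alphabet c al)) := by
        have h := pop?_append_self (l₁.map (fun c => count_letter_of_alphabet c al))
          (count_letter_of_alphabet pick al)
          (l₂.map (fun c => count_letter_of_alphabet c al))
        rw [List.length_map] at h
        simpa [List.map_append] using h
      rw [hm]
      dsimp only
      rw [hidx]
      dsimp only
      rw [hpop1, hpop2, hpop3]
      dsimp only
      have halphA : (PySem.Str.lower pick).toList.foldl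
            (fun al character => if al.contains character then al.erase character else al) al
          = al.filter (fun x => !(PySem.Str.lower pick).toList.contains x) :=
        erase_fold_eq_filter _ al hnd
      have hremv : PySem.Set.inter al (PySem.Set.ofList (PySem.Str.lower pick).toList)
          = al.filter (fun x => (PySem.Str.lower pick).toList.contains x) := by
        simp only [PySem.Set.inter]
        apply List.filter_congr
        intro x _
        exact contains_ofList _ x
      have hnotin : pick ∉ l₁ := fun hmem => lt_irrefl _ (hpre pick hmem)
      have herase : (l₁ ++ pick :: l₂).erase pick = l₁ ++ l₂ := by
        rw [List.erase_append_right _ hnotin, List.erase_cons_head]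
      rw [halphA, hremv, herase]
      have halphB : PySem.Set.diff al
            (al.filter (fun x => (PySem.Str.lower pick).toList.contains x))
          = al.filter (fun x => !(PySem.Str.lower pick).toList.contains x) := by
        simp only [PySem.Set.diff]
        apply List.filter_congr
        intro x hx
        congr 1
        by_cases hc : (PySem.Str.lower pick).toList.contains x = true
        · simp
          exact fun _ => hx
        · simp
          exact fun _ => hx
      have hnd' : (al.filter (fun x => !(PySem.Str.lower pick).toList.contains x)).Nodup :=
        hnd.filter _
      have hsub' : ∀ x ∈ al.filter (fun x => !(PySem.Str.lower pick).toList.contains x),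
          x ∈ "abcdefghijklmnopqrstuvwxyz".toList :=
        fun x hx => hsub x (List.mem_of_mem_filter hx)
      have hscores : (((l₁ ++ l₂).map (fun c => count_letter_of_alphabet c al)).zip
            ((l₁ ++ l₂).map (fun c => letter_counts c))).map
            (fun sd => sd.1
              - ((al.filter (fun x => (PySem.Str.lower pick).toList.contains x)).map
                  (fun l => sd.2.getD l 0)).sum)
          = (l₁ ++ l₂).map (fun c => count_letter_of_alphabet c
              (al.filter (fun x => !(PySem.Str.lower pick).toList.contains x))) := by
        rw [List.zip_map', List.map_map]
        apply List.map_congr_left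
        intro c _
        show count_letter_of_alphabet c al
            - ((al.filter (fun x => (PySem.Str.lower pick).toList.contains x)).map
                (fun l => (letter_counts c).getD l 0)).sum
          = count_letter_of_alphabet c
              (al.filter (fun x => !(PySem.Str.lower pick).toList.contains x))
        rw [← score_eq_key al hnd hsub c, ← score_eq_key _ hnd' hsub' c]
        have hpart := sum_map_filter_partition
          (fun x => (PySem.Str.lower pick).toList.contains x)
          (fun l => (letter_counts c).getD l 0) al
        omega
      rw [halphB, hscores]
      by_cases hrm : al.filter (fun x => (PySem.Str.lower pick).toList.contains x) = []
      · -- no letter of pick remains in the alphabet: both sides keep alphabet and scores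
        rw [if_neg (not_not_intro hrm)]
        have hAeq : al.filter (fun x => !(PySem.Str.lower pick).toList.contains x) = al :=
          List.filter_eq_self.mpr (by
            intro x hx
            have h := List.filter_eq_nil_iff.mp hrm x hx
            simpa using h)
        rw [hAeq]
        dsimp only
        by_cases hemp : al = []
        · rw [if_pos (by rw [hemp]; rfl : al.length = 0), if_pos hemp]
        · rw [if_neg (fun h : al.length = 0 => hemp (List.length_eq_zero_iff.mp h)),
              if_neg hemp]
          exact ih al (res ++ [pick]) (l₁ ++ l₂) hnd hsub
      · -- some letters are removed: both sides shrink the alphabet, B rebuilds scores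
        rw [if_pos hrm]
        dsimp only
        by_cases hemp : al.filter (fun x => !(PySem.Str.lower pick).toList.contains x) = []
        · rw [if_pos (by rw [hemp]; rfl :
              (al.filter (fun x => !(PySem.Str.lower pick).toList.contains x)).length = 0),
            if_pos hemp]
        · rw [if_neg (fun h : (al.filter
              (fun x => !(PySem.Str.lower pick).toList.contains x)).length = 0 =>
              hemp (List.length_eq_zero_iff.mp h)),
            if_neg hemp]
          exact ih _ (res ++ [pick]) (l₁ ++ l₂) hnd' hsub'

-- ===== VERDICT (by name: the statement is the Claim_ definition above) =====
theorem alphabet_set_spec : Claim_equal_alphabet_set := by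
  intro L _
  unfold Spec_alphabet_set alphabet_set alphabet_set_alt
  have h0 : PySem.Set.ofList "abcdefghijklmnopqrstuvwxyz".toList
      = "abcdefghijklmnopqrstuvwxyz".toList := by decide
  have hscores : (L.map (fun c => letter_counts c)).map (fun d => d.values.sum)
      = L.map (fun c => count_letter_of_alphabet c ("abcdefghijklmnopqrstuvwxyz".toList)) := by
    rw [List.map_map]
    exact List.map_congr_left (fun c _ => values_sum_letter_counts c)
  dsimp only
  rw [h0, hscores]
  exact loop_eq L.length _ [] L (by decide) (fun x hx => hx)
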